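-- pv_equiv track=rewrite | github.com/danielfmcosta/adventofcode2024 | day08/problem01.py | different_frequencies
-- ===== SOURCE A (Python) =====
-- def different_frequencies(grid):
--     freqs = []
--     for r, row in enumerate(grid):
--         grid[r] = row.split('.')
--     for row in grid:
--         for col in row:
--             if col not in freqs and col != '':
--                 freqs.append(col)
--     return freqs
-- ===== SOURCE B (Python) =====
-- def different_frequencies(grid):
--     # same in-place mutation as A: each row becomes its '.'-split list
--     for r, row in enumerate(grid):
--         grid[r] = row.split('.')
--     # sieve: take the flattened non-empty tokens, then walk the list once,
--     # deleting every LATER duplicate of the current element in place.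
--     # No membership test against the output is ever made; when the cursor
--     # passes an element, all its duplicates are already gone.
--     toks = [t for row in grid for t in row if t != '']
--     i = 0
--     while i < len(toks):
--         head = toks[i]
--         toks[i + 1:] = [t for t in toks[i + 1:] if t != head]
--         i += 1
--     return toks
-- ===== Notes on version B (the rewrite author's own statement) =====
-- stated objective: alternative
-- what changed: Instead of accumulating an output list guarded by a per-token 'not in' membership scan, B flattens the non-empty tokens once and runs a deletion sieve over that list: a cursor walks it left to right and removes every later duplicate of the current element in place, so the surviving list is the answer with no membership test at all.
import Mathlib
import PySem

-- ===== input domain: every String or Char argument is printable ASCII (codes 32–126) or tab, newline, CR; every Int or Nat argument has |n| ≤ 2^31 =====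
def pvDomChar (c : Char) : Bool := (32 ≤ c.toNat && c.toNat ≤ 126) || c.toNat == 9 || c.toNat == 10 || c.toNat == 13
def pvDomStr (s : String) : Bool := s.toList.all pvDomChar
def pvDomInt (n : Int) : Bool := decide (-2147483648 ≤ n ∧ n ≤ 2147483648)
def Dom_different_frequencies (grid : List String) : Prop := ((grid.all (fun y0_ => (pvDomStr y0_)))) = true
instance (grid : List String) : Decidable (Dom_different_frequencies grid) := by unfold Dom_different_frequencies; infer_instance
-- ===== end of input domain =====

-- B replaces A's membership-guarded accumulation with a deletion sieve over the flattened
-- non-empty tokens (alternative, same cost); both Pythons mutate grid in place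
-- (grid[r] = row.split('.')), the equivalence proved here is about the return value.
-- ===== PORT A =====
-- PySem.Str.split? is exact here: the separator "." is non-empty, so it is always 'some'.
def different_frequencies (grid : List String) : List String :=
  let grid2 := grid.map (fun row => (PySem.Str.split? row ".").getD [])
  grid2.foldl (fun freqs row =>
    row.foldl (fun freqs col =>
      if ¬ freqs.contains col ∧ col ≠ "" then freqs ++ [col] else freqs) freqs) []

-- ===== PORT B =====
-- B's while loop: cursor position i = length of the processed prefix `done`; one step
-- appends the element under the cursor to `done` and deletes its duplicates from the rest.
def pvSieve (done : List String) : List String → List String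
  | [] => done
  | head :: rest => pvSieve (done ++ [head]) (rest.filter (fun t => t ≠ head))
termination_by rest => rest.length
decreasing_by
  simp only [List.length_unattach, List.length_cons]
  exact Nat.lt_succ_of_le (le_trans (List.length_filter_le _ _) (by simp))

def different_frequencies_alt (grid : List String) : List String :=
  let grid2 := grid.map (fun row => (PySem.Str.split? row ".").getD [])
  pvSieve [] (grid2.flatMap (fun row => row.filter (fun tok => tok ≠ "")))

-- ===== PRECONDITION & SPEC =====
def Spec_different_frequencies (grid : List String) (out : List String) : Prop := out = different_frequencies_alt grid
instance (grid : List String) (out : List String) : Decidable (Spec_different_frequencies grid out) := by unfold Spec_different_frequencies; infer_instance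

-- ===== CLAIM (what is proved, stated in full; the proofs are below) =====
def Claim_equal_different_frequencies : Prop := ∀ (grid : List String), Dom_different_frequencies grid → Spec_different_frequencies grid (different_frequencies grid)

-- ===== LEMMAS AND PROOFS =====

-- A's inner loop over one row equals folding PySem.Set.add over the row's non-empty tokens.
lemma loopA_eq_addFold (ts acc : List String) :
    ts.foldl (fun freqs col =>
      if ¬ freqs.contains col ∧ col ≠ "" then freqs ++ [col] else freqs) acc
    = (ts.filter (fun t => t ≠ "")).foldl PySem.Set.add acc := by
  induction ts generalizing acc with
  | nil => rfl
  | cons t ts ih =>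
    simp only [List.foldl_cons, List.filter_cons]
    by_cases h : t = ""
    · rw [if_neg (by simp [h]), if_neg (by simp [h])]
      exact ih acc
    · have h1 : (if ¬acc.contains t = true ∧ t ≠ "" then acc ++ [t] else acc)
          = PySem.Set.add acc t := by
        by_cases hc : t ∈ acc
        · simp [PySem.Set.add, hc]
        · simp [PySem.Set.add, h, hc]
      rw [h1, if_pos (by simp [h]), List.foldl_cons]
      exact ih _

lemma filter_flatten_eq (L : List (List String)) :
    L.flatten.filter (fun t => t ≠ "") = L.flatMap (fun row => row.filter (fun tok => tok ≠ "")) := by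
  simp [List.flatMap_def, List.filter_flatten]

-- the sieve ignores elements already in `done` once they are filtered out; key bridge:
lemma addFold_eq_sieve (ts done : List String) :
    ts.foldl PySem.Set.add done = pvSieve done (ts.filter (fun t => ¬ done.contains t)) := by
  induction hn : ts.length using Nat.strong_induction_on generalizing ts done with
  | _ n ih =>
    cases ts with
    | nil => simp [pvSieve]
    | cons h t =>
      simp only [List.foldl_cons, List.filter_cons]
      by_cases hc : h ∈ done
      · rw [if_neg (by simp [hc])]
        have hadd : PySem.Set.add done h = done := by simp [PySem.Set.add, hc]
        rw [hadd]
        exact ih t.length (by rw [List.length_cons] at hn; omega) t done rfl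
      · rw [if_pos (by simp [hc])]
        have hadd : PySem.Set.add done h = done ++ [h] := by simp [PySem.Set.add, hc]
        rw [hadd, pvSieve]
        have := ih t.length (by rw [List.length_cons] at hn; omega) t (done ++ [h]) rfl
        rw [this]
        congr 1
        rw [List.filter_filter]
        apply List.filter_congr
        intro x _
        by_cases hx : x = h <;> simp [hx, hc, List.contains_eq_mem, eq_comm]

-- ===== VERDICT (by name: the statement is the Claim_ definition above) =====
theorem different_frequencies_spec : Claim_equal_different_frequencies := by
  intro grid _
  unfold Spec_different_frequencies different_frequencies different_frequencies_alt
  simp only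
  rw [← List.foldl_flatten]
  rw [loopA_eq_addFold, addFold_eq_sieve]
  congr 1
  simp only [List.contains_nil, Bool.false_eq_true, not_false_eq_true, decide_true, List.filter_true]
  exact filter_flatten_eq _
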